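-- pv_equiv track=rewrite | github.com/yeji-dev25/study-log-2025 | algorithm/lv0/250807_181926.py | solution
-- ===== SOURCE A (Python) =====
-- def solution(n, control):
--
--     for i in range(len(control)):
--         if control[i] == "w":
--             n += 1
--         elif control[i] == "s":
--             n -= 1
--         elif control[i] == "d":
--             n += 10
--         elif control[i] == "a":
--             n -= 10
--
--     return n
-- ===== SOURCE B (Python) =====
-- def solution(n, control):
--     # staged passes: count each control token separately, then combine arithmetically
--     ups = control.count("w")
--     downs = control.count("s")
--     rights = control.count("d")
--     lefts = control.count("a")
--     return n + (ups - downs) + 10 * (rights - lefts)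
-- ===== Notes on version B (the rewrite author's own statement) =====
-- stated objective: alternative
-- what changed: Replaces the single branch-dispatched accumulator loop with four independent .count scans (one per token) combined by one closed-form arithmetic expression; there is no per-element dispatch or running accumulator.
import Mathlib
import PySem

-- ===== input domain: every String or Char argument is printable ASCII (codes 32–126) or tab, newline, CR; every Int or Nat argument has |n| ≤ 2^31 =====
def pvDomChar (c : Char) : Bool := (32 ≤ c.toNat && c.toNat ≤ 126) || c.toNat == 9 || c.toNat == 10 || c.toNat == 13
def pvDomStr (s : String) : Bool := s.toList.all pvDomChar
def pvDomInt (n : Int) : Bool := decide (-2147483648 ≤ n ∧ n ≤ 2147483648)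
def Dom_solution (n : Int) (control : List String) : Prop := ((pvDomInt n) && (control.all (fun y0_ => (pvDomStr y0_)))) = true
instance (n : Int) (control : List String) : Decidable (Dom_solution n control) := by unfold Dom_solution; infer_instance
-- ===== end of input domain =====

-- B replaces A's branch-dispatched accumulator loop with four independent .count scans combined arithmetically (alternative; same cost).

-- ===== PORT A =====
-- the indexed 'for i in range(len(control))' loop reading control[i] is the fold over control
def solution (n : Int) (control : List String) : Int :=
  control.foldl (fun n c =>
    if c == "w" then n + 1
    else if c == "s" then n - 1
    else if c == "d" then n + 10
    else if c == "a" then n - 10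
    else n) n

-- ===== PORT B =====
def solution_alt (n : Int) (control : List String) : Int :=
  let ups : Int := PySem.List.count control "w"
  let downs : Int := PySem.List.count control "s"
  let rights : Int := PySem.List.count control "d"
  let lefts : Int := PySem.List.count control "a"
  n + (ups - downs) + 10 * (rights - lefts)

-- ===== PRECONDITION & SPEC =====
def Spec_solution (n : Int) (control : List String) (out : Int) : Prop := out = solution_alt n control
instance (n : Int) (control : List String) (out : Int) : Decidable (Spec_solution n control out) := by unfold Spec_solution; infer_instance

-- ===== CLAIM (what is proved, stated in full; the proofs are below) =====
def Claim_equal_solution : Prop := ∀ (n : Int) (control : List String), Dom_solution n control → Spec_solution n control (solution n control)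

-- ===== LEMMAS AND PROOFS =====
lemma solution_closed (n : Int) (control : List String) :
    solution n control =
      n + ((control.count "w" : Int) - (control.count "s" : Int))
        + 10 * ((control.count "d" : Int) - (control.count "a" : Int)) := by
  induction control generalizing n with
  | nil => simp [solution]
  | cons h t ih =>
    simp only [solution, List.foldl_cons] at *
    rw [ih]
    by_cases hw : h = "w" <;> by_cases hs : h = "s" <;> by_cases hd : h = "d" <;>
      by_cases ha : h = "a" <;>
      simp_all [beq_iff_eq] <;> ring

-- ===== VERDICT (by name: the statement is the Claim_ definition above) =====
theorem solution_spec : Claim_equal_solution := by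
  intro n control _
  unfold Spec_solution solution_alt
  simp only [PySem.List.count_eq]
  exact solution_closed n control
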